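-- pv_equiv track=rewrite | github.com/Palishiv7/TradeIQ_Final | backend/assessments/candlestick_patterns/answer_evaluation.py | _are_patterns_similar
-- ===== SOURCE A (Python) =====
-- def _are_patterns_similar(pattern1: str, pattern2: str) -> bool:
--     """
--     Check if two pattern names are similar.
--
--     Args:
--         pattern1: First pattern name
--         pattern2: Second pattern name
--
--     Returns:
--         True if patterns are similar, False otherwise
--     """
--     # Convert to lowercase for case-insensitive comparison
--     p1 = pattern1.lower()
--     p2 = pattern2.lower()
--
--     # Check for exact match
--     if p1 == p2:
--         return True
--
--     # Check if one is a substring of the other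
--     if p1 in p2 or p2 in p1:
--         return True
--
--     # Check for common variations
--     variations = {
--         "engulfing": ["engulfing pattern", "engulfing candle"],
--         "doji": ["doji star", "doji candlestick"],
--         "hammer": ["hammer pattern", "hammer candlestick"],
--         "harami": ["harami pattern", "harami cross"],
--         "star": ["star pattern", "evening star", "morning star"]
--     }
--
--     # Check each set of variations
--     for base, variants in variations.items():
--         if base in p1 or any(v in p1 for v in variants):
--             if base in p2 or any(v in p2 for v in variants):
--                 return True
--
--     return False
-- ===== SOURCE B (Python) =====
-- # The variants dict in the original is redundant: every variant phrase contains its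
-- # base word as a substring, so "base in s or any(v in s)" is exactly "base in s";
-- # likewise p1 == p2 implies p1 in p2. B therefore needs only the substring guard
-- # and a scan over the five base keywords.
-- _BASES = ("engulfing", "doji", "hammer", "harami", "star")
--
-- def _are_patterns_similar(pattern1: str, pattern2: str) -> bool:
--     """Check if two pattern names are similar (substring guard + shared base keyword)."""
--     p1 = pattern1.lower()
--     p2 = pattern2.lower()
--     if p1 in p2 or p2 in p1:
--         return True
--     return any(b in p1 and b in p2 for b in _BASES)
-- ===== Notes on version B (the rewrite author's own statement) =====
-- stated objective: simpler
-- what changed: B drops A's equality guard and the whole variants dict (every variant phrase contains its base word, so the per-group test collapses to 'base in s', and p1 == p2 is subsumed by the substring guard) and replaces the nested per-group loop with a single any() over the five base keywords.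
import Mathlib
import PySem

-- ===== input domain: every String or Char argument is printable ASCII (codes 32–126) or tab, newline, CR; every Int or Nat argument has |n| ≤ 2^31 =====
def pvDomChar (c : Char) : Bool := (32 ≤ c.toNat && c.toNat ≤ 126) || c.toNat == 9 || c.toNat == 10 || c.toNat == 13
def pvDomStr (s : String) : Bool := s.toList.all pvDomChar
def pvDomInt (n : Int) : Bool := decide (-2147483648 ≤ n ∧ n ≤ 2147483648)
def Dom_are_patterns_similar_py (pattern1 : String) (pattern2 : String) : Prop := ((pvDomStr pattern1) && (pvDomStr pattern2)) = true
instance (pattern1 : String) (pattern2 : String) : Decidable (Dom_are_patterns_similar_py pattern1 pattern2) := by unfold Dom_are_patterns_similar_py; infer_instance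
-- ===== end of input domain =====

-- B drops A's redundant equality guard and variants dict (each variant phrase contains its base word) and scans the five base keywords once (simpler, same behaviour).


-- ===== PORT A =====
-- A's variations dict literal (insertion order kept)
def pvVariationsA : List (String × List String) :=
  [("engulfing", ["engulfing pattern", "engulfing candle"]),
   ("doji", ["doji star", "doji candlestick"]),
   ("hammer", ["hammer pattern", "hammer candlestick"]),
   ("harami", ["harami pattern", "harami cross"]),
   ("star", ["star pattern", "evening star", "morning star"])]

-- A's 'for base, variants in variations.items(): if …: if …: return True' loop
def pvSimLoop (p1 p2 : String) : List (String × List String) → Bool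
  | [] => false
  | (base, variants) :: rest =>
    if PySem.Str.isIn base p1 || variants.any (fun v => PySem.Str.isIn v p1) then
      if PySem.Str.isIn base p2 || variants.any (fun v => PySem.Str.isIn v p2) then true
      else pvSimLoop p1 p2 rest
    else pvSimLoop p1 p2 rest

def are_patterns_similar_py (pattern1 : String) (pattern2 : String) : Bool :=
  let p1 := PySem.Str.lower pattern1
  let p2 := PySem.Str.lower pattern2
  if p1 == p2 then true
  else if PySem.Str.isIn p1 p2 || PySem.Str.isIn p2 p1 then true
  else pvSimLoop p1 p2 pvVariationsA

-- ===== PORT B =====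
-- B's _BASES tuple
def pvBases : List String := ["engulfing", "doji", "hammer", "harami", "star"]

def are_patterns_similar_py_alt (pattern1 : String) (pattern2 : String) : Bool :=
  let p1 := PySem.Str.lower pattern1
  let p2 := PySem.Str.lower pattern2
  if PySem.Str.isIn p1 p2 || PySem.Str.isIn p2 p1 then true
  else pvBases.any (fun b => PySem.Str.isIn b p1 && PySem.Str.isIn b p2)

-- ===== PRECONDITION & SPEC =====
def Spec_are_patterns_similar_py (pattern1 : String) (pattern2 : String) (out : Bool) : Prop := out = are_patterns_similar_py_alt pattern1 pattern2
instance (pattern1 : String) (pattern2 : String) (out : Bool) : Decidable (Spec_are_patterns_similar_py pattern1 pattern2 out) := by unfold Spec_are_patterns_similar_py; infer_instance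

-- ===== CLAIM =====
def Claim_equal_are_patterns_similar_py : Prop := ∀ (pattern1 : String) (pattern2 : String), Dom_are_patterns_similar_py pattern1 pattern2 → Spec_are_patterns_similar_py pattern1 pattern2 (are_patterns_similar_py pattern1 pattern2)

-- ===== LEMMAS AND PROOFS =====

-- substring containment is transitive: if sub ⊑ v and v ⊑ s then sub ⊑ s
theorem pvIsIn_trans (sub v s : String)
    (h1 : sub.toList <:+: v.toList) (h2 : PySem.Str.isIn v s = true) :
    PySem.Str.isIn sub s = true := by
  rw [PySem.Str.isIn_iff_infix] at h2 ⊢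
  exact h1.trans h2

-- when every variant contains the base, the per-group condition collapses to 'base in s'
theorem pvCond_collapse (base : String) (variants : List String) (s : String)
    (hv : ∀ v ∈ variants, base.toList <:+: v.toList) :
    (PySem.Str.isIn base s || variants.any (fun v => PySem.Str.isIn v s)) = PySem.Str.isIn base s := by
  cases hb : PySem.Str.isIn base s with
  | true => simp
  | false =>
    simp only [Bool.false_or]
    rw [List.any_eq_false]
    intro v hvm
    rw [Bool.not_eq_true]
    cases hvs : PySem.Str.isIn v s with
    | false => rfl
    | true => rw [pvIsIn_trans base v s (hv v hvm) hvs] at hb; exact hb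

-- A's loop equals B's scan over the bases, whenever every variant contains its base
theorem pvLoop_eq_scan (p1 p2 : String) (L : List (String × List String))
    (h : ∀ bv ∈ L, ∀ v ∈ bv.2, bv.1.toList <:+: v.toList) :
    pvSimLoop p1 p2 L = (L.map Prod.fst).any (fun b => PySem.Str.isIn b p1 && PySem.Str.isIn b p2) := by
  induction L with
  | nil => simp [pvSimLoop]
  | cons hd tl ih =>
    obtain ⟨base, variants⟩ := hd
    have hb : ∀ v ∈ variants, base.toList <:+: v.toList := fun v hv =>
      h (base, variants) List.mem_cons_self v hv
    have htl : ∀ bv ∈ tl, ∀ v ∈ bv.2, bv.1.toList <:+: v.toList := fun bv hm =>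
      h bv (List.mem_cons_of_mem _ hm)
    simp only [pvSimLoop, pvCond_collapse base variants p1 hb, pvCond_collapse base variants p2 hb,
      List.map_cons, List.any_cons, ih htl]
    split_ifs <;> simp_all

-- equal strings contain each other
theorem pvIsIn_refl (s : String) : PySem.Str.isIn s s = true := by
  simp only [PySem.Str.isIn_eq]
  rw [PySem.Chars.isIn_iff_infix]

-- ===== VERDICT =====
theorem are_patterns_similar_py_spec : Claim_equal_are_patterns_similar_py := by
  intro pattern1 pattern2 _
  unfold Spec_are_patterns_similar_py are_patterns_similar_py are_patterns_similar_py_alt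
  simp only
  by_cases hsub : (PySem.Str.isIn (PySem.Str.lower pattern1) (PySem.Str.lower pattern2) ||
      PySem.Str.isIn (PySem.Str.lower pattern2) (PySem.Str.lower pattern1)) = true
  · rw [if_pos hsub]
    split_ifs <;> rfl
  · rw [if_neg hsub]
    have heq : (PySem.Str.lower pattern1 == PySem.Str.lower pattern2) = false := by
      cases h : (PySem.Str.lower pattern1 == PySem.Str.lower pattern2) with
      | false => rfl
      | true =>
        exfalso; apply hsub
        rw [beq_iff_eq] at h
        rw [h, pvIsIn_refl, Bool.true_or]
    rw [heq, if_neg (by simp), if_neg hsub]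
    have h : ∀ bv ∈ pvVariationsA, ∀ v ∈ bv.2, bv.1.toList <:+: v.toList := by decide
    have hbases : pvBases = pvVariationsA.map Prod.fst := by decide
    rw [hbases]
    exact pvLoop_eq_scan _ _ pvVariationsA h
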